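-- pv_equiv track=rewrite | github.com/kody-w/rappterbook | scripts/score_predictions.py | compute_agent_accuracy
-- ===== SOURCE A (Python) =====
-- from typing import Dict, List, Optional
--
-- def compute_agent_accuracy(predictions: List[dict]) -> Dict[str, dict]:
--     """Compute per-agent prediction stats.
--
--     Returns dict of agent_id → {total, open, expired, accuracy_note}.
--     """
--     by_agent: Dict[str, dict] = {}
--     for pred in predictions:
--         author = pred.get("author", "unknown")
--         if author not in by_agent:
--             by_agent[author] = {"total": 0, "open": 0, "expired": 0}
--         by_agent[author]["total"] += 1
--         status = pred.get("status", "open")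
--         if status == "open":
--             by_agent[author]["open"] += 1
--         elif status == "expired":
--             by_agent[author]["expired"] += 1
--
--     return by_agent
-- ===== SOURCE B (Python) =====
-- def compute_agent_accuracy(predictions):
--     """Group predictions by author, then aggregate counts per group."""
--     groups = {}
--     for pred in predictions:
--         groups.setdefault(pred.get("author", "unknown"), []).append(pred)
--     return {
--         author: {
--             "total": len(preds),
--             "open": sum(1 for p in preds if p.get("status", "open") == "open"),
--             "expired": sum(1 for p in preds if p.get("status", "open") == "expired"),
--         }
--         for author, preds in groups.items()
--     }
-- ===== Notes on version B (the rewrite author's own statement) =====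
-- stated objective: alternative
-- what changed: B groups predictions by author into lists first (group-then-aggregate) and then computes total/open/expired per group with len/sum over the group, instead of A's single-pass incremental per-key counter updates.
import Mathlib
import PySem

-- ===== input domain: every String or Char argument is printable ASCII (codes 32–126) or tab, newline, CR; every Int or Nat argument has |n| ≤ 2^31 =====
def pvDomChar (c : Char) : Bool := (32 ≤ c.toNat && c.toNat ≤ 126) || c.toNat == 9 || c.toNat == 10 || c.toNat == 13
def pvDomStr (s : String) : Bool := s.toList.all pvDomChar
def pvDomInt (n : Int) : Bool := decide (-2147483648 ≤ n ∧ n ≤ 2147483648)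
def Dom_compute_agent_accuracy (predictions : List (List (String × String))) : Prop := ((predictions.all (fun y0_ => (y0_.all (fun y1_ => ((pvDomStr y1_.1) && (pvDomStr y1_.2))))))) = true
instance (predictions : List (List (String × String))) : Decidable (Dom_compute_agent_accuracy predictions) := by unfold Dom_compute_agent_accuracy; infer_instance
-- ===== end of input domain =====

-- B groups predictions by author first and then aggregates each group; A counts incrementally in one pass (alternative decomposition, same return value).


-- ===== PORT A =====
-- loop body of A's for-loop (helper name only; code is A's, step for step)
def pvStepA (by_agent : PySem.Dict String (PySem.Dict String Int))
    (pred : List (String × String)) : PySem.Dict String (PySem.Dict String Int) :=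
  let author := (PySem.Dict.mk pred).getD "author" "unknown"
  let by_agent :=
    if by_agent.contains author then by_agent
    else by_agent.insert author (PySem.Dict.mk [("total", 0), ("open", 0), ("expired", 0)])
  let by_agent := by_agent.modify author PySem.Dict.empty (fun m => m.modify "total" 0 (· + 1))
  let status := (PySem.Dict.mk pred).getD "status" "open"
  if status == "open" then by_agent.modify author PySem.Dict.empty (fun m => m.modify "open" 0 (· + 1))
  else if status == "expired" then by_agent.modify author PySem.Dict.empty (fun m => m.modify "expired" 0 (· + 1))
  else by_agent

def compute_agent_accuracy (predictions : List (List (String × String))) : List (String × List (String × Int)) :=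
  let by_agent := predictions.foldl pvStepA PySem.Dict.empty
  by_agent.items.map (fun q => (q.1, q.2.items))

-- ===== PORT B =====
def pvStatus (p : List (String × String)) : String := (PySem.Dict.mk p).getD "status" "open"

-- {"total": len(preds), "open": …, "expired": …} for one group
def pvAgg (preds : List (List (String × String))) : List (String × Int) :=
  [("total", (preds.length : Int)),
   ("open", ((preds.filter (fun p => pvStatus p == "open")).length : Int)),
   ("expired", ((preds.filter (fun p => pvStatus p == "expired")).length : Int))]

-- loop body of B's grouping loop: groups.setdefault(author, []).append(pred)
def pvStepB (g : PySem.Dict String (List (List (String × String))))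
    (pred : List (String × String)) : PySem.Dict String (List (List (String × String))) :=
  g.modify ((PySem.Dict.mk pred).getD "author" "unknown") [] (· ++ [pred])

def compute_agent_accuracy_alt (predictions : List (List (String × String))) : List (String × List (String × Int)) :=
  let groups := predictions.foldl pvStepB PySem.Dict.empty
  groups.items.map (fun q => (q.1, pvAgg q.2))

-- ===== PRECONDITION & SPEC =====
def Spec_compute_agent_accuracy (predictions : List (List (String × String))) (out : List (String × List (String × Int))) : Prop := out = compute_agent_accuracy_alt predictions
instance (predictions : List (List (String × String))) (out : List (String × List (String × Int))) : Decidable (Spec_compute_agent_accuracy predictions out) := by unfold Spec_compute_agent_accuracy; infer_instance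

-- ===== CLAIM (what is proved, stated in full; the proofs are below) =====
def Claim_equal_compute_agent_accuracy : Prop := ∀ (predictions : List (List (String × String))), Dom_compute_agent_accuracy predictions → Spec_compute_agent_accuracy predictions (compute_agent_accuracy predictions)

-- ===== LEMMAS AND PROOFS =====

/-- the aggregated inner dict of a group, as A maintains it -/
def pvF (ps : List (List (String × String))) : PySem.Dict String Int := PySem.Dict.mk (pvAgg ps)

/-- apply pvF to every group of a grouping dict -/
def pvMapF (g : PySem.Dict String (List (List (String × String)))) :
    PySem.Dict String (PySem.Dict String Int) :=
  PySem.Dict.mk (g.items.map (fun q => (q.1, pvF q.2)))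

theorem contains_pvMapF (g : PySem.Dict String (List (List (String × String)))) (a : String) :
    (pvMapF g).contains a = g.contains a := by
  simp only [pvMapF, PySem.Dict.contains, List.any_map]
  rfl

theorem get?_pvMapF (g : PySem.Dict String (List (List (String × String)))) (a : String) :
    (pvMapF g).get? a = (g.get? a).map pvF := by
  simp only [pvMapF, PySem.Dict.get?, List.find?_map]
  have h : ((fun (p : String × PySem.Dict String Int) => p.1 == a) ∘
      (fun (q : String × List (List (String × String))) => (q.1, pvF q.2)))
      = fun q => q.1 == a := rfl
  rw [h]
  cases List.find? (fun q => q.1 == a) g.items <;> rfl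

theorem insert_pvMapF (g : PySem.Dict String (List (List (String × String)))) (a : String)
    (v : List (List (String × String))) :
    pvMapF (g.insert a v) = (pvMapF g).insert a (pvF v) := by
  unfold PySem.Dict.insert
  rw [contains_pvMapF]
  split_ifs with h
  · apply PySem.Dict.ext
    simp only [pvMapF, List.map_map]
    apply List.map_congr_left
    intro q _
    by_cases hq : q.1 = a <;> simp [hq]
  · apply PySem.Dict.ext
    simp [pvMapF]

theorem modify_modify_self {ν : Type} (d : PySem.Dict String ν) (k : String) (d0 : ν)
    (f h : ν → ν) :
    (d.modify k d0 f).modify k d0 h = d.insert k (h (f (d.getD k d0))) := by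
  simp only [PySem.Dict.modify, PySem.Dict.getD_insert_self, PySem.Dict.insert_insert_self]

theorem modify_insert_self {ν : Type} (d : PySem.Dict String ν) (k : String) (v : ν) (d0 : ν)
    (f : ν → ν) :
    (d.insert k v).modify k d0 f = d.insert k (f v) := by
  simp only [PySem.Dict.modify, PySem.Dict.getD_insert_self, PySem.Dict.insert_insert_self]

theorem pvF_nil : PySem.Dict.mk [("total", 0), ("open", 0), ("expired", 0)] = pvF [] := rfl

theorem inner_open (ps : List (List (String × String))) (p : List (String × String))
    (h : pvStatus p = "open") :
    ((pvF ps).modify "total" 0 (· + 1)).modify "open" 0 (· + 1) = pvF (ps ++ [p]) := by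
  simp [pvF, pvAgg, PySem.Dict.modify, PySem.Dict.insert, PySem.Dict.contains, PySem.Dict.getD,
    PySem.Dict.get?, List.filter_append, h]

theorem inner_expired (ps : List (List (String × String))) (p : List (String × String))
    (h : pvStatus p = "expired") :
    ((pvF ps).modify "total" 0 (· + 1)).modify "expired" 0 (· + 1) = pvF (ps ++ [p]) := by
  simp [pvF, pvAgg, PySem.Dict.modify, PySem.Dict.insert, PySem.Dict.contains, PySem.Dict.getD,
    PySem.Dict.get?, List.filter_append, h]

theorem inner_other (ps : List (List (String × String))) (p : List (String × String))
    (h1 : ¬ pvStatus p = "open") (h2 : ¬ pvStatus p = "expired") :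
    (pvF ps).modify "total" 0 (· + 1) = pvF (ps ++ [p]) := by
  simp [pvF, pvAgg, PySem.Dict.modify, PySem.Dict.insert, PySem.Dict.contains, PySem.Dict.getD,
    PySem.Dict.get?, List.filter_append, h1, h2]

theorem stepA_pvMapF (g : PySem.Dict String (List (List (String × String))))
    (pred : List (String × String)) :
    pvStepA (pvMapF g) pred = pvMapF (pvStepB g pred) := by
  unfold pvStepA pvStepB
  dsimp only
  rw [show (PySem.Dict.modify g ((PySem.Dict.mk pred).getD "author" "unknown") []
        (· ++ [pred])) = g.insert ((PySem.Dict.mk pred).getD "author" "unknown")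
        (g.getD ((PySem.Dict.mk pred).getD "author" "unknown") [] ++ [pred]) from rfl,
      insert_pvMapF, contains_pvMapF]
  set a := (PySem.Dict.mk pred).getD "author" "unknown" with ha
  by_cases h : g.contains a = true
  · simp only [h, if_true]
    have hsome : (g.get? a).isSome := by rw [← PySem.Dict.contains_eq_isSome_get?]; exact h
    obtain ⟨ps, hps⟩ := Option.isSome_iff_exists.mp hsome
    have hgD : g.getD a [] = ps := by rw [PySem.Dict.getD_eq_get?_getD, hps]; rfl
    have hMgD : (pvMapF g).getD a PySem.Dict.empty = pvF ps := by
      rw [PySem.Dict.getD_eq_get?_getD, get?_pvMapF, hps]; rfl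
    rw [hgD]
    by_cases h1 : ((PySem.Dict.mk pred).getD "status" "open" == "open") = true
    · simp only [h1, if_true]
      rw [modify_modify_self, hMgD, inner_open ps pred (by simpa [pvStatus] using h1)]
    · by_cases h2 : ((PySem.Dict.mk pred).getD "status" "open" == "expired") = true
      · simp only [h1, h2, if_true, Bool.false_eq_true, if_false]
        rw [modify_modify_self, hMgD, inner_expired ps pred (by simpa [pvStatus] using h2)]
      · simp only [h1, h2, Bool.false_eq_true, if_false]
        rw [PySem.Dict.modify, hMgD,
          inner_other ps pred (by simpa [pvStatus] using h1) (by simpa [pvStatus] using h2)]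
  · simp only [h, Bool.false_eq_true, if_false]
    have hgD : g.getD a [] = [] :=
      PySem.Dict.getD_of_not_contains g [] (by simpa using h)
    rw [hgD, pvF_nil, modify_insert_self]
    by_cases h1 : ((PySem.Dict.mk pred).getD "status" "open" == "open") = true
    · simp only [h1, if_true]
      rw [modify_insert_self, inner_open [] pred (by simpa [pvStatus] using h1)]
    · by_cases h2 : ((PySem.Dict.mk pred).getD "status" "open" == "expired") = true
      · simp only [h1, h2, if_true, Bool.false_eq_true, if_false]
        rw [modify_insert_self, inner_expired [] pred (by simpa [pvStatus] using h2)]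
      · simp only [h1, h2, Bool.false_eq_true, if_false]
        rw [inner_other [] pred (by simpa [pvStatus] using h1) (by simpa [pvStatus] using h2)]

theorem fold_eq (l : List (List (String × String)))
    (g : PySem.Dict String (List (List (String × String)))) :
    l.foldl pvStepA (pvMapF g) = pvMapF (l.foldl pvStepB g) := by
  induction l generalizing g with
  | nil => rfl
  | cons p l ih => simpa [stepA_pvMapF] using ih (pvStepB g p)

-- ===== VERDICT (by name: the statement is the Claim_ definition above) =====
theorem compute_agent_accuracy_spec : Claim_equal_compute_agent_accuracy := by
  intro predictions _
  unfold Spec_compute_agent_accuracy compute_agent_accuracy compute_agent_accuracy_alt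
  have h : predictions.foldl pvStepA PySem.Dict.empty
      = pvMapF (predictions.foldl pvStepB PySem.Dict.empty) :=
    fold_eq predictions PySem.Dict.empty
  simp only [h, pvMapF, List.map_map]
  rfl
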